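-- pv_equiv track=rewrite | github.com/makebashangwe/Labs | PPS1/PPS1_LABS/Lab13/Lab13A.py | count_heat_waves
-- ===== SOURCE A (Python) =====
-- def count_heat_waves(temperatures):
--     heat_wave_count = 0
--     consecutive_days = 0
--     for temp in temperatures:
--         if temp > 30:
--             consecutive_days += 1
--             if consecutive_days == 3:
--                 heat_wave_count += 1
--         else:
--             consecutive_days = 0  # Reset
--     return heat_wave_count
-- ===== SOURCE B (Python) =====
-- def count_heat_waves(temperatures):
--     count = 0
--     i = 0
--     n = len(temperatures)
--     while i < n:
--         if temperatures[i] > 30: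
--             j = i
--             while j < n and temperatures[j] > 30:
--                 j += 1
--             if j - i >= 3:
--                 count += 1
--             i = j
--         else:
--             i += 1
--     return count
-- ===== Notes on version B (the rewrite author's own statement) =====
-- stated objective: alternative
-- what changed: B scans the list as maximal runs of hot days (two-pointer run segmentation) and counts runs of length >= 3, instead of A's single pass maintaining a running consecutive-day counter with an ==3 trigger.
import Mathlib
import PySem

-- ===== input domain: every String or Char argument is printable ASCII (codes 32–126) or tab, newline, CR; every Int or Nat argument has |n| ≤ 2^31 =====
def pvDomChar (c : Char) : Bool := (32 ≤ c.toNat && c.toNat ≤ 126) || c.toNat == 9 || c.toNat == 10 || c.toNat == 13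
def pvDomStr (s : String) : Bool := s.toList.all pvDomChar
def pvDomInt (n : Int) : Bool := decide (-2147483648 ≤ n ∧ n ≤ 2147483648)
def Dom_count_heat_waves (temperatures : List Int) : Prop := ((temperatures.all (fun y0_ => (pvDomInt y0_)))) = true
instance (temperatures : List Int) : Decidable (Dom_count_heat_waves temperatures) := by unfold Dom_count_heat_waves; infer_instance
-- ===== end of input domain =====

-- B replaces A's running consecutive-day counter by a two-pointer scan over maximal hot runs
-- (objective: alternative decomposition, same O(n) cost; return value proved equal on all inputs).

-- ===== PORT A =====
-- A's loop state: (heat_wave_count, consecutive_days), updated per temperature.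
def stepA (s : Int × Int) (t : Int) : Int × Int :=
  if t > 30 then
    (if s.2 + 1 = 3 then s.1 + 1 else s.1, s.2 + 1)
  else
    (s.1, 0)

def count_heat_waves (temperatures : List Int) : Int :=
  (temperatures.foldl stepA (0, 0)).1

-- ===== PORT B =====
-- inner while-loop of Source B: length of the leading hot run and the remaining suffix
def hotRun : List Int → Nat × List Int
  | [] => (0, [])
  | t :: rest =>
    if t > 30 then
      let (k, r) := hotRun rest
      (k + 1, r)
    else (0, t :: rest)

theorem hotRun_snd_length_le (ts : List Int) : (hotRun ts).2.length ≤ ts.length := by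
  induction ts with
  | nil => simp [hotRun]
  | cons t rest ih =>
    simp only [hotRun]
    split
    · simpa using Nat.le_trans ih (Nat.le_succ _)
    · simp

-- outer while-loop of Source B, advancing by one run (hot case) or one element (cold case)
def altGo : List Int → Int
  | [] => 0
  | t :: rest =>
    if t > 30 then
      (if (hotRun rest).1 + 1 ≥ 3 then 1 else 0) + altGo (hotRun rest).2
    else altGo rest
termination_by ts => ts.length
decreasing_by
  · exact Nat.lt_succ_of_le (hotRun_snd_length_le rest)
  · simp

def count_heat_waves_alt (temperatures : List Int) : Int :=
  altGo temperatures

-- ===== PRECONDITION & SPEC =====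
def Spec_count_heat_waves (temperatures : List Int) (out : Int) : Prop := out = count_heat_waves_alt temperatures
instance (temperatures : List Int) (out : Int) : Decidable (Spec_count_heat_waves temperatures out) := by unfold Spec_count_heat_waves; infer_instance

-- ===== CLAIM (what is proved, stated in full; the proofs are below) =====
def Claim_equal_count_heat_waves : Prop := ∀ (temperatures : List Int), Dom_count_heat_waves temperatures → Spec_count_heat_waves temperatures (count_heat_waves temperatures)

-- ===== LEMMAS AND PROOFS =====

-- hotRun splits the list: ts = pre ++ r with pre all hot of length k, and r not starting hot.
theorem hotRun_split (ts : List Int) :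
    ∃ pre, ts = pre ++ (hotRun ts).2 ∧ pre.length = (hotRun ts).1 ∧
      (∀ x ∈ pre, x > 30) ∧
      ((hotRun ts).2 = [] ∨ ∃ y ys, (hotRun ts).2 = y :: ys ∧ ¬ y > 30) := by
  induction ts with
  | nil => exact ⟨[], by simp [hotRun]⟩
  | cons t rest ih =>
    by_cases h : t > 30
    · obtain ⟨pre, h1, h2, h3, h4⟩ := ih
      refine ⟨t :: pre, ?_, ?_, ?_, ?_⟩
      · simp [hotRun, h, ← h1]
      · simp [hotRun, h, h2]
      · intro x hx; rcases List.mem_cons.1 hx with rfl | hx; exact h; exact h3 x hx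
      · simpa [hotRun, h] using h4
    · exact ⟨[], by simp [hotRun, h], by simp [hotRun, h], by simp, Or.inr ⟨t, rest, by simp [hotRun, h], h⟩⟩

-- A's fold over a fully hot segment: the counter advances by the length, the count
-- increments exactly when the counter passes through 3.
theorem foldA_hot (pre : List Int) (hpre : ∀ x ∈ pre, x > 30) (hw c : Int) (hc : 0 ≤ c) :
    pre.foldl stepA (hw, c) =
      (hw + (if c ≤ 2 ∧ 3 ≤ c + pre.length then 1 else 0), c + pre.length) := by
  induction pre generalizing hw c with
  | nil =>
    simp only [List.foldl_nil, List.length_nil, Nat.cast_zero, add_zero]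
    rw [if_neg (by omega)]
    simp
  | cons x pre ih =>
    have hx : x > 30 := hpre x (List.mem_cons_self ..)
    have h' : ∀ y ∈ pre, y > 30 := fun y hy => hpre y (List.mem_cons_of_mem _ hy)
    simp only [List.foldl_cons, stepA, if_pos hx]
    rw [ih h' _ _ (by omega)]
    simp only [Prod.mk.injEq, List.length_cons]
    constructor
    · split_ifs <;> omega
    · omega

-- Main invariant: resuming A's fold with counter 0 adds altGo of the remaining list.
theorem foldA_eq_altGo (ts : List Int) (hw : Int) :
    (ts.foldl stepA (hw, 0)).1 = hw + altGo ts := by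
  induction hn : ts.length using Nat.strong_induction_on generalizing ts hw with
  | _ n ih =>
  match ts with
  | [] => simp [altGo]
  | t :: rest =>
    by_cases h : t > 30
    · obtain ⟨pre, h1, h2, h3, h4⟩ := hotRun_split rest
      rw [altGo, if_pos h]
      simp only [List.foldl_cons, stepA, if_pos h]
      norm_num
      conv_lhs => rw [h1]
      rw [List.foldl_append, foldA_hot pre h3 _ _ (by norm_num)]
      rcases h4 with hr | ⟨y, ys, hr, hy⟩
      · rw [hr]
        simp only [List.foldl_nil]
        rw [show altGo ([] : List Int) = 0 from by simp [altGo], ← h2]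
        split_ifs with c1 c2
        · omega
        · exact absurd c1.2 (by omega)
        · exact absurd ⟨by norm_num, by omega⟩ c1
        · omega
      · rw [hr]
        simp only [List.foldl_cons, stepA, if_neg hy]
        have hlen : ys.length < n := by
          have := hotRun_snd_length_le rest
          rw [hr] at this
          simp only [List.length_cons] at this hn
          omega
        rw [ih ys.length hlen ys _ rfl,
            show altGo (y :: ys) = altGo ys from by rw [altGo, if_neg hy], ← h2]
        split_ifs with c1 c2
        · omega
        · exact absurd c1.2 (by omega)
        · exact absurd ⟨by norm_num, by omega⟩ c1
        · omega
    · rw [altGo, if_neg h]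
      simp only [List.foldl_cons, stepA, if_neg h]
      have hlen : rest.length < n := by simp at hn; omega
      exact ih rest.length hlen rest hw rfl

-- ===== VERDICT (by name: the statement is the Claim_ definition above) =====
theorem count_heat_waves_spec : Claim_equal_count_heat_waves := by
  intro ts _
  unfold Spec_count_heat_waves count_heat_waves count_heat_waves_alt
  simpa using foldA_eq_altGo ts 0
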